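-- pv_equiv track=rewrite | github.com/YudengLin/BDAL_for_Robot_Skill_Learning | 4K_HETU/app/apps.py | makeInputOrV
-- ===== SOURCE A (Python) =====
-- def makeInputOrV(active, inactive, start, count, len):
--     voltage = []
--     for i in range(len):
--         if start <= i < start + count:
--             voltage.append(active)
--         else:
--             voltage.append(inactive)
--     return voltage
-- ===== SOURCE B (Python) =====
-- def makeInputOrV(active, inactive, start, count, len):
--     # Closed-form: clamp the active window [start, start+count) to [0, len)
--     # and assemble the list by replication, no per-element loop.
--     n = max(0, len)
--     lo = min(max(0, start), n)
--     hi = min(max(0, start + count), n)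
--     k = max(0, hi - lo)
--     return [inactive] * lo + [active] * k + [inactive] * (n - lo - k)
-- ===== Notes on version B (the rewrite author's own statement) =====
-- stated objective: faster
-- what changed: Replaces the per-element loop with a closed-form construction: clamp the active window to the index range and build the list from three replicated blocks.
import Mathlib
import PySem

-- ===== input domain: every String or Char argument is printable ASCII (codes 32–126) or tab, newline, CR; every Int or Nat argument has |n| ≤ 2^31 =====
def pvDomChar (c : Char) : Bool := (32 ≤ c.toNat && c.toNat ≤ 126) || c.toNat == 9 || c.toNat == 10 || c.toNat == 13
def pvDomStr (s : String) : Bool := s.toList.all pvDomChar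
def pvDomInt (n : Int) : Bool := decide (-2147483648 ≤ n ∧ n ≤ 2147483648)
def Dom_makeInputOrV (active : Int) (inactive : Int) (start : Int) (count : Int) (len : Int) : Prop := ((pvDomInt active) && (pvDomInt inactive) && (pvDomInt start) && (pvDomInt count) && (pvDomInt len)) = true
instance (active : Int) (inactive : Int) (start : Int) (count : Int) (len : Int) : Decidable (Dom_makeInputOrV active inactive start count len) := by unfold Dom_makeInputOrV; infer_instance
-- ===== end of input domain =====

-- ===== PORT A =====
-- B replaces A's per-element loop by a closed-form three-block construction (constant-factor simpler/faster).
def makeInputOrV (active : Int) (inactive : Int) (start : Int) (count : Int) (len : Int) : List Int :=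
  (PySem.List.pyRange 0 len 1).foldl
    (fun voltage i =>
      if start ≤ i ∧ i < start + count then voltage ++ [active] else voltage ++ [inactive])
    []

-- ===== PORT B =====
def makeInputOrV_alt (active : Int) (inactive : Int) (start : Int) (count : Int) (len : Int) : List Int :=
  let n := max 0 len
  let lo := min (max 0 start) n
  let hi := min (max 0 (start + count)) n
  let k := max 0 (hi - lo)
  List.replicate lo.toNat inactive ++ List.replicate k.toNat active
    ++ List.replicate (n - lo - k).toNat inactive

-- ===== PRECONDITION & SPEC =====
def Spec_makeInputOrV (active : Int) (inactive : Int) (start : Int) (count : Int) (len : Int) (out : List Int) : Prop := out = makeInputOrV_alt active inactive start count len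
instance (active : Int) (inactive : Int) (start : Int) (count : Int) (len : Int) (out : List Int) : Decidable (Spec_makeInputOrV active inactive start count len out) := by unfold Spec_makeInputOrV; infer_instance

-- ===== CLAIM (what is proved, stated in full; the proofs are below) =====
def Claim_equal_makeInputOrV : Prop := ∀ (active : Int) (inactive : Int) (start : Int) (count : Int) (len : Int), Dom_makeInputOrV active inactive start count len → Spec_makeInputOrV active inactive start count len (makeInputOrV active inactive start count len)

-- ===== LEMMAS AND PROOFS =====

-- The per-index value both programs compute at index i.
def pvCell (active inactive start count : Int) (i : Int) : Int :=
  if start ≤ i ∧ i < start + count then active else inactive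

-- A's loop is a map of pvCell over range(len).
theorem makeInputOrV_eq_map (active inactive start count len : Int) :
    makeInputOrV active inactive start count len
      = (List.range len.toNat).map (fun j : Nat => pvCell active inactive start count (j : Int)) := by
  unfold makeInputOrV
  have h : (fun (voltage : List Int) (i : Int) =>
      if start ≤ i ∧ i < start + count then voltage ++ [active] else voltage ++ [inactive])
      = fun voltage i => voltage ++ [pvCell active inactive start count i] := by
    funext voltage i
    by_cases hc : start ≤ i ∧ i < start + count <;> simp [pvCell, hc]
  rw [h, PySem.List.foldl_append_singleton_eq_map, PySem.List.pyRange_one, List.map_map]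
  simp

-- B is the same map, proved elementwise.
theorem makeInputOrV_alt_eq_map (active inactive start count len : Int) :
    makeInputOrV_alt active inactive start count len
      = (List.range len.toNat).map (fun j : Nat => pvCell active inactive start count (j : Int)) := by
  unfold makeInputOrV_alt
  set n := max 0 len with hn
  set lo := min (max 0 start) n with hlo
  set hi := min (max 0 (start + count)) n with hhi
  set k := max 0 (hi - lo) with hk
  have h0n : 0 ≤ n := le_max_left _ _
  have h0lo : 0 ≤ lo := le_min (le_max_left _ _) h0n
  have h0k : 0 ≤ k := le_max_left _ _
  have hlon : lo ≤ n := min_le_right _ _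
  have hkn : lo + k ≤ n := by
    have : hi ≤ n := min_le_right _ _
    by_cases h : hi - lo ≤ 0
    · have : k = 0 := by omega
      omega
    · have : k = hi - lo := by omega
      omega
  have hnlen : n.toNat = len.toNat := by omega
  apply List.ext_getElem
  · simp [hnlen.symm]
    omega
  · intro m h1 h2
    simp only [List.getElem_map, List.getElem_range]
    have hm : (m : Int) < n := by
      have : m < len.toNat := by simpa using h2
      omega
    rcases lt_or_ge (m : Int) lo with hcase | hcase
    · -- first (inactive) block
      have hmlt : m < lo.toNat := by omega
      rw [List.getElem_append_left (by simp; omega),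
          List.getElem_append_left (by simp; omega),
          List.getElem_replicate]
      have : ¬ (start ≤ (m : Int) ∧ (m : Int) < start + count) := by
        simp only [hlo] at hcase
        omega
      simp [pvCell, this]
    · rcases lt_or_ge (m : Int) (lo + k) with hcase2 | hcase2
      · -- active block
        rw [List.getElem_append_left (by simp; omega),
            List.getElem_append_right (by simp; omega),
            List.getElem_replicate]
        have hkpos : 0 < k := by omega
        have hkeq : k = hi - lo := by omega
        have : start ≤ (m : Int) ∧ (m : Int) < start + count := by
          simp only [hlo, hhi] at hcase hcase2 hkeq ⊢
          omega
        simp [pvCell, this]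
      · -- trailing (inactive) block
        rw [List.getElem_append_right (by simp; omega),
            List.getElem_replicate]
        have : ¬ (start ≤ (m : Int) ∧ (m : Int) < start + count) := by
          have hkge : hi - lo ≤ k := le_max_right _ _
          simp only [hlo, hhi] at hcase hcase2 hkge ⊢
          omega
        simp [pvCell, this]

-- ===== VERDICT (by name: the statement is the Claim_ definition above) =====
theorem makeInputOrV_spec : Claim_equal_makeInputOrV := by
  intro active inactive start count len _
  unfold Spec_makeInputOrV
  rw [makeInputOrV_eq_map, makeInputOrV_alt_eq_map]
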